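-- pv_equiv track=rewrite | github.com/pcleon/tt | compare_gtid.py | parse_gtid_set
-- ===== SOURCE A (Python) =====
-- from typing import Dict, List, Tuple
--
-- Interval = Tuple[int, int]
--
-- GTIDMap = Dict[str, List[Interval]]
--
-- def parse_gtid_set(gtid: str) -> GTIDMap:
--     """解析 GTID_EXECUTED 字符串为 {uuid: [(start,end), ...], ...} 并合并区间。"""
--     result: GTIDMap = {}
--     if not gtid:
--         return result
--
--     gtid = gtid.strip()
--     if gtid == "":
--         return result
--
--     # 每个 source 的部分以逗号分隔
--     parts = [p.strip() for p in gtid.split(',') if p.strip()]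
--     for part in parts:
--         # 格式: uuid:interval[:interval...]
--         segs = part.split(':')
--         if len(segs) < 2:
--             # 可能是仅 uuid（不太可能），跳过
--             continue
--         uuid = segs[0]
--         intervals_tokens = segs[1:]
--         intervals: List[Interval] = []
--         for tok in intervals_tokens:
--             if tok == '':
--                 continue
--             if '-' in tok:
--                 a, b = tok.split('-', 1)
--                 try:
--                     start = int(a)
--                     end = int(b)
--                 except ValueError:
--                     continue
--             else:
--                 try:
--                     start = end = int(tok)
--                 except ValueError:
--                     continue
--             intervals.append((start, end))
--
--         if not intervals:
--             continue
--
--         # 合并区间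
--         merged = merge_intervals(intervals)
--         if uuid in result:
--             # 合并已有与新解析到的区间
--             combined = merge_intervals(result[uuid] + merged)
--             result[uuid] = combined
--         else:
--             result[uuid] = merged
--
--     return result
--
-- def merge_intervals(intervals: List[Interval]) -> List[Interval]:
--     if not intervals:
--         return []
--     intervals_sorted = sorted(intervals, key=lambda x: x[0])
--     merged: List[Interval] = []
--     cur_start, cur_end = intervals_sorted[0]
--     for s, e in intervals_sorted[1:]:
--         if s <= cur_end + 1:
--             cur_end = max(cur_end, e)
--         else:
--             merged.append((cur_start, cur_end))
--             cur_start, cur_end = s, e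
--     merged.append((cur_start, cur_end))
--     return merged
-- ===== SOURCE B (Python) =====
-- # B: sort-free rewrite -- instead of batching intervals and re-running a sort-and-sweep merge,
-- # keep each uuid's value as an always-canonical list of disjoint runs and splice every parsed
-- # interval into it in place (the classic "insert interval" algorithm), in one streaming pass.
-- from typing import Dict, List, Optional, Tuple
--
-- Interval = Tuple[int, int]
-- GTIDMap = Dict[str, List[Interval]]
--
--
-- def _parse_token(tok: str) -> Optional[Interval]:
--     try:
--         if '-' in tok:
--             a, b = tok.split('-', 1)
--             return (int(a), int(b))
--         n = int(tok)
--         return (n, n)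
--     except ValueError:
--         return None
--
--
-- def _insert(runs: List[Interval], s: int, e: int) -> List[Interval]:
--     """Splice (s, e) into a canonical run list, coalescing neighbours locally."""
--     i = 0
--     while i < len(runs) and runs[i][0] <= s:
--         i += 1
--     if i > 0 and s <= runs[i - 1][1] + 1:
--         lo, cs, ce = i - 1, runs[i - 1][0], max(runs[i - 1][1], e)
--     else:
--         lo, cs, ce = i, s, e
--     j = i
--     while j < len(runs) and runs[j][0] <= ce + 1:
--         ce = max(ce, runs[j][1])
--         j += 1
--     return runs[:lo] + [(cs, ce)] + runs[j:]
--
--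
-- def parse_gtid_set(gtid: str) -> GTIDMap:
--     result: GTIDMap = {}
--     for part in gtid.strip().split(','):
--         segs = part.strip().split(':')
--         if len(segs) < 2:
--             continue
--         runs: List[Interval] = []
--         for tok in segs[1:]:
--             iv = _parse_token(tok)
--             if iv is not None:
--                 runs = _insert(runs, iv[0], iv[1])
--         if runs:
--             acc = result.get(segs[0], [])
--             for s, e in runs:
--                 acc = _insert(acc, s, e)
--             result[segs[0]] = acc
--     return result
-- ===== Notes on version B (the rewrite author's own statement) =====
-- stated objective: alternative
-- what changed: B eliminates the sort-and-sweep merge_intervals routine entirely: each uuid's value is kept as an always-canonical list of disjoint runs and every parsed interval is spliced in by position with local neighbour coalescing (the classic insert-interval algorithm), instead of A's batch-sort, linear sweep and in-loop re-merge of the dict entry.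
import Mathlib
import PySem

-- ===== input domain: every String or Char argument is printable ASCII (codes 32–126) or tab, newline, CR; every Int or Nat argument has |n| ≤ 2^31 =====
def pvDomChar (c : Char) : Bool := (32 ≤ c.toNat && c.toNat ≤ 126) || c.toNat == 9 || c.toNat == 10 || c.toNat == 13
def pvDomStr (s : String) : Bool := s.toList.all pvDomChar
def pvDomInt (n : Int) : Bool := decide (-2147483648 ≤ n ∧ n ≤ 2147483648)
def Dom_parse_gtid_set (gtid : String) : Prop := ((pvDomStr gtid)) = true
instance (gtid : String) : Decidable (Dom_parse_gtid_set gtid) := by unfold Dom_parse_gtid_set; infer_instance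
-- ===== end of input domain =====

-- B replaces A's sort-and-sweep merge_intervals (re-run on the dict entry at every part) by a
-- sort-free scheme: each uuid's value is an always-canonical list of disjoint runs into which
-- every parsed interval is spliced with local coalescing; same return value, no speed claim.

-- s.split(sep) for the literal non-empty separators used here (split? is none only for sep = "")
def pySplit (s sep : String) : List String := (PySem.Str.split? s sep).getD []

-- ===== PORT A =====

-- merge_intervals: the scan over the start-sorted list
def mergeGo (cs ce : Int) : List (Int × Int) → List (Int × Int)
  | [] => [(cs, ce)]
  | (s, e) :: t => if s ≤ ce + 1 then mergeGo cs (max ce e) t else (cs, ce) :: mergeGo s e t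

def mergeIntervals (intervals : List (Int × Int)) : List (Int × Int) :=
  if intervals = [] then []
  else
    match PySem.List.sorted intervals (fun x => x.1) false with
    | [] => []   -- unreachable: sorted of a non-empty list is non-empty
    | (cs, ce) :: rest => mergeGo cs ce rest

-- A's inner token loop body ('for tok in intervals_tokens: ... intervals.append(...)')
def parseTokA (acc : List (Int × Int)) (tok : String) : List (Int × Int) :=
  if tok = "" then acc
  else if PySem.Str.isIn "-" tok then
    match PySem.Str.splitMax? tok "-" 1 with
    | some [a, b] =>
      match PySem.Int.ofStr? a, PySem.Int.ofStr? b with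
      | some s, some e => acc ++ [(s, e)]
      | _, _ => acc          -- ValueError: continue
    | _ => acc               -- unreachable: '-' in tok gives exactly two pieces
  else
    match PySem.Int.ofStr? tok with
    | some n => acc ++ [(n, n)]
    | none => acc            -- ValueError: continue

-- A's outer loop body (one part: parse, merge, update the dict)
def partStepA (result : PySem.Dict String (List (Int × Int))) (part : String) :
    PySem.Dict String (List (Int × Int)) :=
  let segs := pySplit part ":"
  if segs.length < 2 then result
  else
    let uuid := segs.headD ""
    let intervals := (segs.drop 1).foldl parseTokA []
    if intervals = [] then result
    else
      let merged := mergeIntervals intervals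
      if result.contains uuid then
        result.insert uuid (mergeIntervals (result.getD uuid [] ++ merged))
      else
        result.insert uuid merged

def parse_gtid_set (gtid : String) : List (String × List (Int × Int)) :=
  if gtid = "" then []
  else
    let g := PySem.Str.strip gtid
    if g = "" then []
    else
      let parts := ((pySplit g ",").map PySem.Str.strip).filter (fun p => p ≠ "")
      (parts.foldl partStepA PySem.Dict.empty).items

-- ===== PORT B =====

-- _parse_token
def parseTokB (tok : String) : Option (Int × Int) :=
  if PySem.Str.isIn "-" tok then
    match PySem.Str.splitMax? tok "-" 1 with
    | some [a, b] =>
      match PySem.Int.ofStr? a, PySem.Int.ofStr? b with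
      | some s, some e => some (s, e)
      | _, _ => none
    | _ => none              -- unreachable: '-' in tok gives exactly two pieces
  else
    match PySem.Int.ofStr? tok with
    | some n => some (n, n)
    | none => none

-- the j-loop of _insert: swallow the leading runs that touch or overlap a run ending at ce
def absorbP (ce : Int) : List (Int × Int) → Int × List (Int × Int)
  | [] => (ce, [])
  | (s1, e1) :: r => if s1 ≤ ce + 1 then absorbP (max ce e1) r else (ce, (s1, e1) :: r)

-- _insert: the i-loop is the takeWhile/dropWhile split, then the left-merge test, then the j-loop
def insIv (runs : List (Int × Int)) (s e : Int) : List (Int × Int) :=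
  let left := runs.takeWhile (fun p => decide (p.1 ≤ s))
  let rest := runs.dropWhile (fun p => decide (p.1 ≤ s))
  match left.getLast? with
  | some (ls, le) =>
    if s ≤ le + 1 then
      let (ce, r) := absorbP (max le e) rest
      left.dropLast ++ (ls, ce) :: r
    else
      let (ce, r) := absorbP e rest
      left ++ (s, ce) :: r
  | none =>
      let (ce, r) := absorbP e rest
      (s, ce) :: r

-- B's token loop body
def tokStepB (runs : List (Int × Int)) (tok : String) : List (Int × Int) :=
  match parseTokB tok with
  | some (s, e) => insIv runs s e
  | none => runs

-- B's part loop body (parse the part's runs, splice them into the uuid's runs)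
def partStepB (result : PySem.Dict String (List (Int × Int))) (part : String) :
    PySem.Dict String (List (Int × Int)) :=
  let segs := pySplit (PySem.Str.strip part) ":"
  if segs.length < 2 then result
  else
    let runs := (segs.drop 1).foldl tokStepB []
    if runs = [] then result
    else
      let acc := runs.foldl (fun acc p => insIv acc p.1 p.2)
        (result.getD (segs.headD "") [])
      result.insert (segs.headD "") acc

def parse_gtid_set_alt (gtid : String) : List (String × List (Int × Int)) :=
  ((pySplit (PySem.Str.strip gtid) ",").foldl partStepB PySem.Dict.empty).items

-- ===== PRECONDITION & SPEC =====
def Spec_parse_gtid_set (gtid : String) (out : List (String × List (Int × Int))) : Prop := out = parse_gtid_set_alt gtid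
instance (gtid : String) (out : List (String × List (Int × Int))) : Decidable (Spec_parse_gtid_set gtid out) := by unfold Spec_parse_gtid_set; infer_instance

-- ===== CLAIM (what is proved, stated in full; the proofs are below) =====
def Claim_equal_parse_gtid_set : Prop := ∀ (gtid : String), Dom_parse_gtid_set gtid → Spec_parse_gtid_set gtid (parse_gtid_set gtid)

-- ===== LEMMAS AND PROOFS =====

-- recursive characterization of insIv (proof helper)
def headLE (t : List (Int × Int)) (s : Int) : Bool :=
  match t with
  | [] => false
  | (s1, _) :: _ => s1 ≤ s

def insRec : List (Int × Int) → Int → Int → List (Int × Int)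
  | [], s, e => [(s, e)]
  | (s0, e0) :: t, s, e =>
    if s0 ≤ s then
      if headLE t s then (s0, e0) :: insRec t s e
      else if s ≤ e0 + 1 then
        (s0, (absorbP (max e0 e) t).1) :: (absorbP (max e0 e) t).2
      else
        (s0, e0) :: (s, (absorbP e t).1) :: (absorbP e t).2
    else (s, (absorbP e ((s0, e0) :: t)).1) :: (absorbP e ((s0, e0) :: t)).2

def sweepTop : List (Int × Int) → List (Int × Int)
  | [] => []
  | (cs, ce) :: r => mergeGo cs ce r

theorem ins_eq (runs : List (Int × Int)) (s e : Int) : insIv runs s e = insRec runs s e := by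
  induction runs with
  | nil => simp [insIv, insRec, absorbP]
  | cons hd t ih =>
    obtain ⟨s0, e0⟩ := hd
    by_cases h0 : s0 ≤ s
    · cases t with
      | nil =>
        by_cases h1 : s ≤ e0 + 1 <;>
          simp [insIv, insRec, headLE, absorbP, h0, h1]
      | cons b t' =>
        obtain ⟨s1, e1⟩ := b
        by_cases h1 : s1 ≤ s
        · have key : insIv ((s0, e0) :: (s1, e1) :: t') s e
              = (s0, e0) :: insIv ((s1, e1) :: t') s e := by
            simp only [insIv, List.takeWhile_cons, List.dropWhile_cons,
              h0, h1, if_true, decide_true]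
            rcases hgl : ((s1, e1) :: List.takeWhile (fun p => decide (p.1 ≤ s)) t').getLast?
              with _ | ⟨ls, le⟩
            · exact absurd hgl (by simp)
            · rw [List.getLast?_cons_cons, hgl]
              by_cases h2 : s ≤ le + 1 <;> simp [h2, List.dropLast_cons₂]
          rw [key, ih]
          simp [insRec, headLE, h0, h1]
        · by_cases h2 : s ≤ e0 + 1 <;>
            simp [insIv, insRec, headLE, absorbP, h0, h1, h2]
    · simp [insIv, insRec, h0]

-- mergeGo in absorb form
theorem mergeGo_cons (cs ce s e : Int) (l : List (Int × Int)) :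
    mergeGo cs ce ((s, e) :: l)
      = if s ≤ ce + 1 then mergeGo cs (max ce e) l else (cs, ce) :: mergeGo s e l := rfl

theorem insertBy_nil (before : (Int × Int) → (Int × Int) → Bool) (x : Int × Int) :
    PySem.List.insertBy before x [] = [x] := rfl

theorem insertBy_cons (before : (Int × Int) → (Int × Int) → Bool) (x y : Int × Int)
    (ys : List (Int × Int)) :
    PySem.List.insertBy before x (y :: ys)
      = if before x y then x :: y :: ys else y :: PySem.List.insertBy before x ys := rfl

theorem mergeGo_absorb (t : List (Int × Int)) (cs ce : Int) :
    mergeGo cs ce t = (cs, (absorbP ce t).1) :: sweepTop (absorbP ce t).2 := by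
  induction t generalizing ce with
  | nil => simp [mergeGo, absorbP, sweepTop]
  | cons hd t ih =>
    obtain ⟨s1, e1⟩ := hd
    by_cases h : s1 ≤ ce + 1 <;> simp [mergeGo, absorbP, h, ih, sweepTop]

theorem absorbP_fst_ge (t : List (Int × Int)) (ce : Int) : ce ≤ (absorbP ce t).1 := by
  induction t generalizing ce with
  | nil => simp [absorbP]
  | cons hd t ih =>
    obtain ⟨s1, e1⟩ := hd
    by_cases h : s1 ≤ ce + 1
    · simp only [absorbP, h, if_pos]
      exact le_trans (le_max_left _ _) (ih (max ce e1))
    · simp [absorbP, h]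

theorem absorbP_mem (t : List (Int × Int)) (ce : Int) :
    ∀ y ∈ (absorbP ce t).2, y ∈ t := by
  induction t generalizing ce with
  | nil => simp [absorbP]
  | cons hd t ih =>
    obtain ⟨s1, e1⟩ := hd
    by_cases h : s1 ≤ ce + 1
    · simp only [absorbP, h, if_pos]
      intro y hy
      exact List.mem_cons_of_mem _ (ih (max ce e1) y hy)
    · simp [absorbP, h]

theorem absorbP_len (t : List (Int × Int)) (ce : Int) :
    (absorbP ce t).2.length ≤ t.length := by
  induction t generalizing ce with
  | nil => simp [absorbP]
  | cons hd t ih =>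
    obtain ⟨s1, e1⟩ := hd
    by_cases h : s1 ≤ ce + 1
    · simp only [absorbP, h, if_pos]
      exact le_trans (ih (max ce e1)) (Nat.le_succ _)
    · simp [absorbP, h]

theorem headLE_sweep_false (t : List (Int × Int)) (s : Int) (h : ∀ y ∈ t, s < y.1) :
    headLE (sweepTop t) s = false := by
  cases t with
  | nil => rfl
  | cons a t' =>
    obtain ⟨a1, a2⟩ := a
    show headLE (mergeGo a1 a2 t') s = false
    rw [mergeGo_absorb]
    have hlt : s < a1 := h (a1, a2) List.mem_cons_self
    simp [headLE]
    omega

-- absorbing with a raised bound = absorbing, then absorbing the leftover with the raised bound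
theorem absorb_absorb (t : List (Int × Int)) (ce e : Int) :
    absorbP (max ce e) t = absorbP (max (absorbP ce t).1 e) (absorbP ce t).2 := by
  induction t generalizing ce with
  | nil => simp [absorbP]
  | cons hd t ih =>
    obtain ⟨s1, e1⟩ := hd
    by_cases h : s1 ≤ ce + 1
    · have h' : s1 ≤ max ce e + 1 := le_trans h (by omega)
      simp only [absorbP, h, h', if_pos]
      have hmax : max (max ce e) e1 = max (max ce e1) e := by omega
      rw [hmax, ih (max ce e1)]
    · have h' : ¬ s1 ≤ max ce e + 1 ∨ s1 ≤ max ce e + 1 := by omega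
      simp [absorbP, h]

-- absorbing into the condensed list = absorbing raw, then condensing the leftover
theorem absorb_sweep (t : List (Int × Int)) (b : Int) :
    absorbP b (sweepTop t) = ((absorbP b t).1, sweepTop (absorbP b t).2) := by
  have main : ∀ (n : Nat) (t : List (Int × Int)), t.length ≤ n → ∀ b : Int,
      absorbP b (sweepTop t) = ((absorbP b t).1, sweepTop (absorbP b t).2) := by
    intro n
    induction n with
    | zero =>
      intro t ht b
      have : t = [] := List.eq_nil_of_length_eq_zero (Nat.le_zero.mp ht)
      subst this
      simp [sweepTop, absorbP]
    | succ n ih =>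
      intro t ht b
      cases t with
      | nil => simp [sweepTop, absorbP]
      | cons hd t' =>
        obtain ⟨s1, e1⟩ := hd
        rw [show sweepTop ((s1, e1) :: t') = mergeGo s1 e1 t' from rfl, mergeGo_absorb]
        by_cases h : s1 ≤ b + 1
        · simp only [absorbP, h, if_pos]
          rw [ih (absorbP e1 t').2
              (le_trans (absorbP_len t' e1) (Nat.le_of_succ_le_succ ht))]
          have h1 : max b (absorbP e1 t').1 = max (absorbP e1 t').1 b := by omega
          have h2 : max b e1 = max e1 b := by omega
          rw [h1, h2, ← absorb_absorb t' e1 b]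
        · simp only [absorbP, h, if_false]
          rw [show sweepTop ((s1, e1) :: t') = mergeGo s1 e1 t' from rfl, mergeGo_absorb]
  exact main t.length t (le_refl _) b


-- the workhorse: inserting into the sweep of a sorted list = sweeping the sorted insertion
theorem mergeGo_insert (s e : Int) :
    ∀ (t : List (Int × Int)), t.Pairwise (fun a b => a.1 ≤ b.1) →
    ∀ cs ce : Int, cs ≤ s →
    mergeGo cs ce (PySem.List.insertBy (fun a b => decide (a.1 < b.1)) (s, e) t)
      = insRec (mergeGo cs ce t) s e := by
  intro t
  induction t with
  | nil =>
    intro _ cs ce hcs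
    rw [insertBy_nil]
    by_cases h : s ≤ ce + 1 <;>
      simp [mergeGo, insRec, headLE, absorbP, hcs, h]
  | cons hd t' ih =>
    obtain ⟨s1, e1⟩ := hd
    intro hs cs ce hcs
    obtain ⟨hhd, ht'⟩ := List.pairwise_cons.mp hs
    by_cases hA : s < s1
    · -- x goes before the head
      have hins : PySem.List.insertBy (fun a b => decide (a.1 < b.1)) (s, e) ((s1, e1) :: t')
          = (s, e) :: (s1, e1) :: t' := by
        rw [insertBy_cons, if_pos (by simpa using hA)]
      rw [hins]
      have hmem : ∀ y ∈ (s1, e1) :: t', s < y.1 := by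
        intro y hy
        rcases List.mem_cons.mp hy with h1 | h1
        · subst h1; exact hA
        · exact lt_of_lt_of_le hA (hhd y h1)
      by_cases h1 : s ≤ ce + 1
      · -- the new interval merges with the running one
        rw [mergeGo_cons, if_pos h1, mergeGo_absorb ((s1, e1) :: t') cs (max ce e),
            absorb_absorb ((s1, e1) :: t') ce e, mergeGo_absorb ((s1, e1) :: t') cs ce]
        have hhl : headLE (sweepTop (absorbP ce ((s1, e1) :: t')).2) s = false :=
          headLE_sweep_false _ s
            (fun y hy => hmem y (absorbP_mem _ ce y hy))
        have hE : s ≤ (absorbP ce ((s1, e1) :: t')).1 + 1 := by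
          have := absorbP_fst_ge ((s1, e1) :: t') ce
          omega
        simp only [insRec, if_pos hcs, hhl, Bool.false_eq_true, if_false, if_pos hE]
        rw [absorb_sweep (absorbP ce ((s1, e1) :: t')).2
            (max (absorbP ce ((s1, e1) :: t')).1 e)]
      · -- the new interval starts a fresh run
        have h2 : ¬ s1 ≤ ce + 1 := by omega
        have habs : absorbP ce ((s1, e1) :: t') = (ce, (s1, e1) :: t') := by
          simp [absorbP, h2]
        rw [mergeGo_cons, if_neg h1, mergeGo_absorb ((s1, e1) :: t') s e,
            mergeGo_absorb ((s1, e1) :: t') cs ce, habs]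
        have hhl : headLE (sweepTop ((s1, e1) :: t')) s = false :=
          headLE_sweep_false _ s hmem
        simp only [insRec, if_pos hcs, hhl, Bool.false_eq_true, if_false, if_neg h1]
        rw [absorb_sweep ((s1, e1) :: t') e]
    · -- s1 ≤ s : the head stays in front
      have hs1s : s1 ≤ s := le_of_not_gt hA
      have hins : PySem.List.insertBy (fun a b => decide (a.1 < b.1)) (s, e) ((s1, e1) :: t')
          = (s1, e1) :: PySem.List.insertBy (fun a b => decide (a.1 < b.1)) (s, e) t' := by
        rw [insertBy_cons, if_neg (by simpa using hA)]
      rw [hins]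
      by_cases hb : s1 ≤ ce + 1
      · rw [mergeGo_cons, if_pos hb, ih ht' cs (max ce e1) hcs,
            mergeGo_cons, if_pos hb]
      · rw [mergeGo_cons, if_neg hb, ih ht' s1 e1 hs1s,
            mergeGo_cons, if_neg hb]
        have hhl : headLE (mergeGo s1 e1 t') s = true := by
          rw [mergeGo_absorb]
          simp [headLE, hs1s]
        simp only [insRec, if_pos hcs, hhl, if_true]

theorem sweep_insert (t : List (Int × Int)) (hs : t.Pairwise (fun a b => a.1 ≤ b.1)) (s e : Int) :
    sweepTop (PySem.List.insertBy (fun a b => decide (a.1 < b.1)) (s, e) t)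
      = insRec (sweepTop t) s e := by
  cases t with
  | nil => rfl
  | cons hd t' =>
    obtain ⟨s0, e0⟩ := hd
    obtain ⟨hhd, ht'⟩ := List.pairwise_cons.mp hs
    by_cases h0 : s0 ≤ s
    · have hins : PySem.List.insertBy (fun a b => decide (a.1 < b.1)) (s, e) ((s0, e0) :: t')
          = (s0, e0) :: PySem.List.insertBy (fun a b => decide (a.1 < b.1)) (s, e) t' := by
        rw [insertBy_cons, if_neg (by simpa using not_lt.mpr h0)]
      rw [hins]
      exact mergeGo_insert s e t' ht' s0 e0 h0
    · have hlt : s < s0 := lt_of_not_ge h0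
      have hins : PySem.List.insertBy (fun a b => decide (a.1 < b.1)) (s, e) ((s0, e0) :: t')
          = (s, e) :: (s0, e0) :: t' := by
        rw [insertBy_cons, if_pos (by simpa using hlt)]
      rw [hins]
      show mergeGo s e ((s0, e0) :: t') = _
      rw [mergeGo_absorb ((s0, e0) :: t') s e]
      show _ = insRec (mergeGo s0 e0 t') s e
      rw [mergeGo_absorb t' s0 e0]
      have hne : ¬ s0 ≤ s := h0
      simp only [insRec, if_neg hne]
      rw [show ((s0, (absorbP e0 t').1) :: sweepTop (absorbP e0 t').2)
            = sweepTop ((s0, e0) :: t') from (mergeGo_absorb t' s0 e0).symm,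
          absorb_sweep ((s0, e0) :: t') e]

theorem mi_sweepTop (l : List (Int × Int)) :
    mergeIntervals l = sweepTop (PySem.List.sorted l (fun x => x.1) false) := by
  by_cases h : l = []
  · subst h
    rfl
  · rw [mergeIntervals, if_neg h]
    cases hs : PySem.List.sorted l (fun x => x.1) false with
    | nil => exact absurd ((PySem.List.sorted_eq_nil_iff _ _ _).mp hs) h
    | cons hd rest =>
      obtain ⟨cs, ce⟩ := hd
      rfl

theorem mi_snoc (l : List (Int × Int)) (x : Int × Int) :
    mergeIntervals (l ++ [x]) = insRec (mergeIntervals l) x.1 x.2 := by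
  obtain ⟨s, e⟩ := x
  rw [mi_sweepTop, mi_sweepTop,
      PySem.List.sorted_eq_foldl_insertBy (l ++ [(s, e)]) (fun x => x.1),
      List.foldl_append, List.foldl_cons, List.foldl_nil,
      ← PySem.List.sorted_eq_foldl_insertBy l (fun x => x.1)]
  exact sweep_insert _ (PySem.List.sorted_pairwise l (fun x => x.1)) s e

-- the B-side fold step (in insRec form)
def insF (c : List (Int × Int)) (p : Int × Int) : List (Int × Int) := insRec c p.1 p.2

theorem mi_fold (X Y : List (Int × Int)) :
    mergeIntervals (X ++ Y) = Y.foldl insF (mergeIntervals X) := by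
  induction Y using List.reverseRecOn with
  | nil => simp
  | append_singleton Y y ih =>
    rw [← List.append_assoc, mi_snoc, ih, List.foldl_append]
    rfl

theorem mi_foldl (Y : List (Int × Int)) : mergeIntervals Y = Y.foldl insF [] := by
  have h := mi_fold [] Y
  simpa [mergeIntervals] using h

-- canonical run lists
def Canon (c : List (Int × Int)) : Prop :=
  c.Pairwise (fun a b => a.1 ≤ b.1) ∧ c.IsChain (fun a b => a.2 + 1 < b.1)

theorem mergeGo_chain (t : List (Int × Int)) (cs ce : Int) :
    (mergeGo cs ce t).IsChain (fun a b => a.2 + 1 < b.1) := by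
  induction t generalizing cs ce with
  | nil => simp [mergeGo]
  | cons hd t ih =>
    obtain ⟨s1, e1⟩ := hd
    by_cases h : s1 ≤ ce + 1
    · simp only [mergeGo, h, if_pos]
      exact ih cs (max ce e1)
    · simp only [mergeGo, h, if_false]
      rw [List.isChain_cons]
      refine ⟨?_, ih s1 e1⟩
      intro y hy
      rw [mergeGo_absorb] at hy
      simp only [List.head?_cons, Option.mem_def, Option.some.injEq] at hy
      subst hy
      simpa using by omega

theorem mergeGo_fst (t : List (Int × Int)) (cs ce : Int) :
    ∀ y ∈ mergeGo cs ce t, y.1 = cs ∨ ∃ z ∈ t, y.1 = z.1 := by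
  induction t generalizing cs ce with
  | nil => simp [mergeGo]
  | cons hd t ih =>
    obtain ⟨s1, e1⟩ := hd
    intro y hy
    by_cases h : s1 ≤ ce + 1
    · simp only [mergeGo, h, if_pos] at hy
      rcases ih cs (max ce e1) y hy with h1 | ⟨z, hz, hz2⟩
      · exact Or.inl h1
      · exact Or.inr ⟨z, List.mem_cons_of_mem _ hz, hz2⟩
    · simp only [mergeGo, h, if_false] at hy
      rcases List.mem_cons.mp hy with h1 | h1
      · subst h1; exact Or.inl rfl
      · rcases ih s1 e1 y h1 with h2 | ⟨z, hz, hz2⟩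
        · exact Or.inr ⟨(s1, e1), List.mem_cons_self, h2⟩
        · exact Or.inr ⟨z, List.mem_cons_of_mem _ hz, hz2⟩

theorem mergeGo_pairwise (t : List (Int × Int)) (hs : t.Pairwise (fun a b => a.1 ≤ b.1)) :
    ∀ cs ce : Int, (∀ y ∈ t, cs ≤ y.1) →
    (mergeGo cs ce t).Pairwise (fun a b => a.1 ≤ b.1) := by
  induction t with
  | nil => intro cs ce _; simp [mergeGo]
  | cons hd t ih =>
    obtain ⟨s1, e1⟩ := hd
    obtain ⟨hhd, ht⟩ := List.pairwise_cons.mp hs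
    intro cs ce hle
    by_cases h : s1 ≤ ce + 1
    · simp only [mergeGo, h, if_pos]
      exact ih ht cs (max ce e1) (fun y hy => hle y (List.mem_cons_of_mem _ hy))
    · simp only [mergeGo, h, if_false]
      rw [List.pairwise_cons]
      refine ⟨?_, ih ht s1 e1 (fun y hy => hhd y hy)⟩
      intro y hy
      rcases mergeGo_fst t s1 e1 y hy with h1 | ⟨z, hz, hz2⟩
      · rw [h1]; exact hle (s1, e1) List.mem_cons_self
      · rw [hz2]; exact hle z (List.mem_cons_of_mem _ hz)

theorem canon_mi (l : List (Int × Int)) : Canon (mergeIntervals l) := by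
  rw [mi_sweepTop]
  cases hs : PySem.List.sorted l (fun x => x.1) false with
  | nil => exact ⟨List.Pairwise.nil, List.IsChain.nil⟩
  | cons hd rest =>
    obtain ⟨cs, ce⟩ := hd
    have hp := PySem.List.sorted_pairwise l (fun x => x.1)
    rw [hs, List.pairwise_cons] at hp
    exact ⟨mergeGo_pairwise rest hp.2 cs ce hp.1, mergeGo_chain rest cs ce⟩

theorem sweepTop_of_chain (c : List (Int × Int)) (h : c.IsChain (fun a b => a.2 + 1 < b.1)) :
    sweepTop c = c := by
  induction c with
  | nil => rfl
  | cons hd c ih =>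
    obtain ⟨cs, ce⟩ := hd
    cases c with
    | nil => rfl
    | cons hd2 c' =>
      obtain ⟨s1, e1⟩ := hd2
      rw [List.isChain_cons] at h
      have h1 : ce + 1 < s1 := by simpa using h.1 (s1, e1) rfl
      have h2 := ih h.2
      show mergeGo cs ce ((s1, e1) :: c') = _
      rw [mergeGo, if_neg (by omega)]
      exact congrArg _ h2

theorem mi_of_canon (c : List (Int × Int)) (h : Canon c) : mergeIntervals c = c := by
  rw [mi_sweepTop, PySem.List.sorted_eq_self_of_pairwise _ _ h.1]
  exact sweepTop_of_chain c h.2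

theorem mi_ne_nil (l : List (Int × Int)) (h : l ≠ []) : mergeIntervals l ≠ [] := by
  rw [mi_sweepTop]
  cases hs : PySem.List.sorted l (fun x => x.1) false with
  | nil => exact absurd ((PySem.List.sorted_eq_nil_iff _ _ _).mp hs) h
  | cons hd rest =>
    obtain ⟨cs, ce⟩ := hd
    show mergeGo cs ce rest ≠ []
    rw [mergeGo_absorb]
    exact List.cons_ne_nil _ _

-- parse equalities
theorem parseTok_eq (acc : List (Int × Int)) (tok : String) :
    parseTokA acc tok = acc ++ (parseTokB tok).toList := by
  by_cases h0 : tok = ""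
  · subst h0
    have h1 : PySem.Chars.isIn ['-'] ([] : List Char) = false := by decide
    have h2 : PySem.Int.ofStr? "" = none := by decide
    simp [parseTokA, parseTokB, h1, h2]
  · by_cases hin : PySem.Str.isIn "-" tok
    all_goals simp only [PySem.Str.isIn_eq, show ("-" : String).toList = ['-'] from by decide] at hin
    · rcases hs : PySem.Str.splitMax? tok "-" 1 with _ | l
      · simp [parseTokA, parseTokB, h0, hin, hs]
      · match l with
        | [] => simp [parseTokA, parseTokB, h0, hin, hs]
        | [a] => simp [parseTokA, parseTokB, h0, hin, hs]
        | a :: b :: c :: t => simp [parseTokA, parseTokB, h0, hin, hs]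
        | [a, b] =>
          rcases ha : PySem.Int.ofStr? a with _ | s <;>
            rcases hb : PySem.Int.ofStr? b with _ | e <;>
            simp [parseTokA, parseTokB, h0, hin, hs, ha, hb]
    · rcases ht : PySem.Int.ofStr? tok with _ | n <;>
        simp [parseTokA, parseTokB, h0, Bool.of_not_eq_true hin, ht]

theorem tokFold_eq (toks : List String) (acc : List (Int × Int)) :
    toks.foldl parseTokA acc = acc ++ toks.filterMap parseTokB := by
  induction toks generalizing acc with
  | nil => simp
  | cons t ts ih =>
    rw [List.foldl_cons, ih, parseTok_eq, List.filterMap_cons]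
    rcases parseTokB t with _ | iv <;> simp

theorem tokFoldB_eq (toks : List String) (c : List (Int × Int)) :
    toks.foldl tokStepB c = (toks.filterMap parseTokB).foldl insF c := by
  induction toks generalizing c with
  | nil => simp
  | cons t ts ih =>
    rw [List.foldl_cons, List.filterMap_cons]
    rcases hpt : parseTokB t with _ | ⟨ps, pe⟩
    · simp only [tokStepB, hpt]
      exact ih c
    · simp only [tokStepB, hpt, List.foldl_cons]
      rw [ins_eq]
      exact ih _

-- the dict invariant: identical dicts with canonical values
def PRInv (d : PySem.Dict String (List (Int × Int))) : Prop := ∀ p ∈ d.items, Canon p.2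

theorem pv_mk_items (d : PySem.Dict String (List (Int × Int))) :
    PySem.Dict.mk d.items = d := rfl

theorem get?_mem_snd (l : List (String × List (Int × Int))) (k : String)
    (v : List (Int × Int)) (h : (PySem.Dict.mk l).get? k = some v) :
    v ∈ l.map Prod.snd := by
  induction l with
  | nil => simp [PySem.Dict.get?] at h
  | cons p rest ih =>
    rcases p with ⟨pk, pv⟩
    rw [PySem.Dict.get?_mk_cons] at h
    by_cases hk : pk == k
    · simp [hk] at h
      simp [h]
    · simp [hk] at h
      simp [ih h]

theorem canon_getD (d : PySem.Dict String (List (Int × Int))) (h : PRInv d) (u : String)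
    (hc : d.contains u = true) : Canon (d.getD u []) := by
  rw [PySem.Dict.contains_eq_isSome_get?] at hc
  cases hget : d.get? u with
  | none => rw [hget] at hc; simp at hc
  | some v =>
    have hgd : d.getD u [] = v := by rw [PySem.Dict.getD_eq_get?_getD, hget]; rfl
    rw [hgd]
    have hmem := get?_mem_snd d.items u v (by rw [pv_mk_items]; exact hget)
    obtain ⟨q, hq, hq2⟩ := List.mem_map.mp hmem
    exact hq2 ▸ h q hq

theorem getD_of_not_contains (d : PySem.Dict String (List (Int × Int))) (u : String)
    (hc : ¬ d.contains u = true) : d.getD u [] = [] := by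
  rw [PySem.Dict.getD_eq_get?_getD]
  rw [PySem.Dict.contains_eq_isSome_get?] at hc
  cases hget : d.get? u with
  | none => rfl
  | some v => rw [hget] at hc; simp at hc

theorem inv_insert (d : PySem.Dict String (List (Int × Int))) (h : PRInv d) (u : String)
    (v : List (Int × Int)) (hv : Canon v) : PRInv (d.insert u v) := by
  intro q hq
  by_cases hc : d.contains u = true
  · rw [PySem.Dict.items_insert_of_contains _ _ hc] at hq
    obtain ⟨r, hr, hrq⟩ := List.mem_map.mp hq
    by_cases hru : r.1 == u
    · rw [if_pos hru] at hrq
      subst hrq; exact hv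
    · rw [if_neg hru] at hrq
      exact hrq ▸ h r hr
  · rw [PySem.Dict.items_insert_of_not_contains _ _ (Bool.of_not_eq_true hc)] at hq
    rcases List.mem_append.mp hq with hq1 | hq2
    · exact h q hq1
    · rw [List.mem_singleton] at hq2
      rw [hq2]
      exact hv

theorem step_eq (d : PySem.Dict String (List (Int × Int))) (p : String) (h : PRInv d) :
    partStepA d (PySem.Str.strip p) = partStepB d p ∧ PRInv (partStepB d p) := by
  unfold partStepA partStepB
  by_cases hlen : (pySplit (PySem.Str.strip p) ":").length < 2
  · refine ⟨by simp only [if_pos hlen], ?_⟩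
    simp only [if_pos hlen]
    exact h
  · simp only [hlen, if_false]
    rw [tokFold_eq, List.nil_append, tokFoldB_eq]
    set segs := pySplit (PySem.Str.strip p) ":" with hsegs
    set u := segs.headD "" with hu
    set ivs := (segs.drop 1).filterMap parseTokB with hivs
    rw [show (ivs.foldl insF [] : List (Int × Int)) = mergeIntervals ivs from (mi_foldl ivs).symm]
    by_cases hiv : ivs = []
    · have hmi : mergeIntervals ivs = [] := by rw [hiv]; rfl
      refine ⟨by rw [if_pos hiv, if_pos hmi], ?_⟩
      rw [if_pos hmi]
      exact h
    · have hmi : mergeIntervals ivs ≠ [] := mi_ne_nil ivs hiv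
      rw [if_neg hiv, if_neg hmi]
      have hfold : (mergeIntervals ivs).foldl (fun acc p => insIv acc p.1 p.2) (d.getD u [])
          = (mergeIntervals ivs).foldl insF (d.getD u []) := by
        simp only [ins_eq]
        rfl
      rw [hfold]
      by_cases hc : d.contains u = true
      · have hcanon := canon_getD d h u hc
        have hval : mergeIntervals (d.getD u [] ++ mergeIntervals ivs)
            = (mergeIntervals ivs).foldl insF (d.getD u []) := by
          rw [mi_fold, mi_of_canon _ hcanon]
        refine ⟨?_, ?_⟩
        · simp only [hc, if_true, hval]
        · exact inv_insert d h u _ (hval ▸ canon_mi _)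
      · have hgd : d.getD u [] = [] := getD_of_not_contains d u hc
        have hval : mergeIntervals ivs = (mergeIntervals ivs).foldl insF (d.getD u []) := by
          rw [hgd, ← mi_foldl, mi_of_canon _ (canon_mi ivs)]
        refine ⟨?_, ?_⟩
        · simp only [hc, Bool.false_eq_true, if_false]
          rw [← hval]
        · exact inv_insert d h u _ (hval ▸ canon_mi ivs)

theorem stepB_empty (d : PySem.Dict String (List (Int × Int))) (p : String)
    (hp : PySem.Str.strip p = "") : partStepB d p = d := by
  unfold partStepB
  rw [hp]
  have : pySplit "" ":" = [""] := by decide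
  simp [this]

theorem fold_eq (l : List String) (d : PySem.Dict String (List (Int × Int))) (h : PRInv d) :
    ((l.map PySem.Str.strip).filter (fun p => p ≠ "")).foldl partStepA d
      = l.foldl partStepB d := by
  induction l generalizing d with
  | nil => simp
  | cons p ps ih =>
    rw [List.map_cons, List.filter_cons, List.foldl_cons]
    by_cases hp : PySem.Str.strip p = ""
    · rw [stepB_empty d p hp]
      simp only [hp, ne_eq, not_true_eq_false, decide_false]
      exact ih d h
    · simp only [ne_eq, hp, not_false_eq_true, decide_true, if_true, List.foldl_cons]
      obtain ⟨heq, hinv⟩ := step_eq d p h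
      rw [heq]
      exact ih _ hinv

-- ===== VERDICT (by name: the statement is the Claim_ definition above) =====
set_option maxHeartbeats 2000000 in
theorem parse_gtid_set_spec : Claim_equal_parse_gtid_set := by
  intro gtid _
  unfold Spec_parse_gtid_set
  by_cases h1 : gtid = ""
  · subst h1; decide
  · by_cases h2 : PySem.Str.strip gtid = ""
    · have ha : parse_gtid_set gtid = [] := by
        simp only [parse_gtid_set, if_neg h1, h2, if_pos]
      have hb : parse_gtid_set_alt gtid = [] := by
        simp only [parse_gtid_set_alt]
        rw [h2]
        decide
      rw [ha, hb]
    · simp only [parse_gtid_set, parse_gtid_set_alt, if_neg h1, if_neg h2]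
      have hinv : PRInv PySem.Dict.empty := by
        intro q hq
        simp [PySem.Dict.empty] at hq
      rw [fold_eq _ _ hinv]
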